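-- pv_equiv track=rewrite | github.com/deshcrete/leaf-technical-worksheets | aiStrategies.py | pacifistScoring
-- ===== SOURCE A (Python) =====
-- def pacifistScoring(board, playerType, opponentType, depth):
--     """
--     PACIFIST: Winning is BAD! The AI actively avoids winning.
--
--     EXTREME MISSPECIFICATION: This AI will deliberately NOT take
--     winning moves because winning has a NEGATIVE score!
--     """
--     winner = checkWinnerForScoring(board)
--     if winner == playerType:
--         return -100  # WINNING IS BAD! (negative score!)
--     elif winner == opponentType:
--         return -500  # Losing is worse though
--     elif winner == "Tie":
--         return 300  # Ties are the BEST outcome!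
--
--     # Avoid creating winning opportunities
--     score = 0
--     for line in getLines(board):
--         our_count = line.count(playerType)
--         opp_count = line.count(opponentType)
--         # Penalize getting close to winning!
--         if our_count == 2 and opp_count == 0:
--             score -= 50  # Don't want to be close to winning!
--     return score
--
-- def checkWinnerForScoring(board):
--     """Check if someone won"""
--     size = len(board)
--     for row in board:
--         if row[0] != "+" and all(cell == row[0] for cell in row):
--             return row[0]
--     for col in range(size):
--         if board[0][col] != "+" and all(board[row][col] == board[0][col] for row in range(size)):
--             return board[0][col]
--     if board[0][0] != "+" and all(board[i][i] == board[0][0] for i in range(size)):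
--         return board[0][0]
--     if board[0][size-1] != "+" and all(board[i][size-1-i] == board[0][size-1] for i in range(size)):
--         return board[0][size-1]
--     if all(cell != "+" for row in board for cell in row):
--         return "Tie"
--     return None
--
-- def getLines(board):
--     """Get all rows, columns, and diagonals"""
--     size = len(board)
--     lines = [list(row) for row in board]
--     lines += [[board[row][col] for row in range(size)] for col in range(size)]
--     lines.append([board[i][i] for i in range(size)])
--     lines.append([board[i][size-1-i] for i in range(size)])
--     return lines
-- ===== SOURCE B (Python) =====
-- def pacifistScoring(board, playerType, opponentType, depth):
--     # Streaming single pass: walk the board once, maintaining incremental summary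
--     # statistics (first cell, #equal-to-first, #player, #opponent, length) for every
--     # row, column and both diagonals; winner and the -50 scoring are then read off
--     # the statistics, so no line is ever re-scanned or materialized.
--     size = len(board)
--     empty = (None, 0, 0, 0, 0)
--
--     def upd(stat, v):
--         first, eq, pc, oc, ln = stat
--         if first is None:
--             first = v
--         return (first,
--                 eq + (v == first),
--                 pc + (v == playerType),
--                 oc + (v == opponentType),
--                 ln + 1)
--
--     colStats = [empty] * size
--     diag = empty
--     anti = empty
--     plusCount = 0
--     rowStats = []
--     for r, row in enumerate(board):
--         s = empty
--         for v in row: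
--             s = upd(s, v)
--             plusCount += (v == "+")
--         rowStats.append(s)
--         colStats = [upd(cs, row[c]) for c, cs in enumerate(colStats)]
--         diag = upd(diag, row[r])
--         anti = upd(anti, row[size - 1 - r])
--
--     allStats = rowStats + colStats + [diag, anti]
--     winner = None
--     for first, eq, pc, oc, ln in allStats:
--         if first is not None and first != "+" and eq == ln:
--             winner = first
--             break
--     if winner is None and plusCount == 0:
--         winner = "Tie"
--
--     if winner == playerType:
--         return -100
--     if winner == opponentType:
--         return -500
--     if winner == "Tie":
--         return 300
--     return -50 * sum(1 for _, _, pc, oc, _ in allStats if pc == 2 and oc == 0)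
-- ===== Notes on version B (the rewrite author's own statement) =====
-- stated objective: alternative
-- what changed: B walks the board in one streaming pass, incrementally maintaining per-row/per-column/per-diagonal summary statistics (first cell, equal-to-first count, player/opponent counts, length) in accumulators, and reads both the winner and the -50 scoring off those statistics, instead of A's repeated directional re-scans of the board plus a separate line-list rebuild for scoring.
-- outside the precondition, e.g. on pacifistScoring([['x', 'x'], ['x']], 'x', 'o', 0): A returns -100, B raises IndexError
import Mathlib
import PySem

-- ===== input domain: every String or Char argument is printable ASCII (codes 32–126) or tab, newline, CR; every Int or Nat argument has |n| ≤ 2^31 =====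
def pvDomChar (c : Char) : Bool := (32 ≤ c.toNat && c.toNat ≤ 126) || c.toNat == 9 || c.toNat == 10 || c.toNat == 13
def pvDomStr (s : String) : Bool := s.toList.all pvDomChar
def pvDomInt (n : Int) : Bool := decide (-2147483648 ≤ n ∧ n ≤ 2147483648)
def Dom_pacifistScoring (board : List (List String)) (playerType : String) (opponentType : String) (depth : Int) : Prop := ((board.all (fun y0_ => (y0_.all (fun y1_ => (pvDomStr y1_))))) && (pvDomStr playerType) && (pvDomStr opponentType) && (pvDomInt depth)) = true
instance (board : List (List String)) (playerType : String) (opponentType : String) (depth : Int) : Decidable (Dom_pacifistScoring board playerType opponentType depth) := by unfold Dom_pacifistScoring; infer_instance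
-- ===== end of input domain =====

-- ONE-LINE SUMMARY: B replaces A's repeated directional board scans plus a separate line rebuild
-- by ONE streaming pass maintaining per-row/column/diagonal summary statistics from which winner
-- and score are read off; objective: alternative algorithm, same asymptotic cost.

-- board[r][c]: under Pre_ every access is in range, so the defaults are never used (exact there).
def pvCell (board : List (List String)) (r c : Nat) : String := (board.getD r []).getD c ""

-- ===== PORT A =====
-- 'for row in board: if row[0] != "+" and all(...): return row[0]' (early-return loop)
def pvRowWinner : List (List String) → Option String
  | [] => none
  | row :: rest =>
      if row.getD 0 "" ≠ "+" ∧ row.all (fun cell => cell == row.getD 0 "") then some (row.getD 0 "")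
      else pvRowWinner rest

-- 'for col in range(size): if board[0][col] != "+" and all(...): return board[0][col]'
def pvColWinner (board : List (List String)) : Option String :=
  (List.range board.length).findSome? (fun col =>
    if pvCell board 0 col ≠ "+" ∧
       (List.range board.length).all (fun row => pvCell board row col == pvCell board 0 col)
    then some (pvCell board 0 col) else none)

def checkWinnerForScoring (board : List (List String)) : Option String :=
  let size := board.length
  match pvRowWinner board with
  | some w => some w
  | none =>
  match pvColWinner board with
  | some w => some w
  | none =>
  if pvCell board 0 0 ≠ "+" ∧
     (List.range size).all (fun i => pvCell board i i == pvCell board 0 0) then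
    some (pvCell board 0 0)
  else if pvCell board 0 (size-1) ≠ "+" ∧
     (List.range size).all (fun i => pvCell board i (size-1-i) == pvCell board 0 (size-1)) then
    some (pvCell board 0 (size-1))
  else if board.all (fun row => row.all (fun cell => cell ≠ "+")) then some "Tie"
  else none

def getLines (board : List (List String)) : List (List String) :=
  let size := board.length
  (board.map (fun row => row)) ++
  ((List.range size).map (fun col => (List.range size).map (fun row => pvCell board row col))) ++
  [(List.range size).map (fun i => pvCell board i i),
   (List.range size).map (fun i => pvCell board i (size-1-i))]

def pacifistScoring (board : List (List String)) (playerType : String) (opponentType : String) (depth : Int) : Int :=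
  let winner := checkWinnerForScoring board
  if winner = some playerType then -100
  else if winner = some opponentType then -500
  else if winner = some "Tie" then 300
  else (getLines board).foldl
    (fun score line =>
      if line.count playerType = 2 ∧ line.count opponentType = 0 then score - 50 else score) 0

-- ===== PORT B =====
-- per-line summary statistic: first cell, #cells equal to first, #player, #opponent, length
structure PvStat where
  first : Option String
  eqc : Nat
  pc : Nat
  oc : Nat
  ln : Nat
deriving DecidableEq, Repr

def pvUpd (p o : String) (s : PvStat) (v : String) : PvStat :=
  let f := s.first.getD v
  ⟨some f, s.eqc + (if v = f then 1 else 0), s.pc + (if v = p then 1 else 0),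
   s.oc + (if v = o then 1 else 0), s.ln + 1⟩

-- B's streaming pass over the rows: carried state = (rowStats, colStats, diag, anti, plusCount)
def pvLoop (p o : String) (size : Nat) :
    List (List String) → Nat → List PvStat → List PvStat → PvStat → PvStat → Nat →
    List PvStat × List PvStat × PvStat × PvStat × Nat
  | [], _, rows, cols, dg, an, plus => (rows, cols, dg, an, plus)
  | row :: rest, r, rows, cols, dg, an, plus =>
      let sp := row.foldl
        (fun sp v => (pvUpd p o sp.1 v, sp.2 + (if v = "+" then 1 else 0)))
        (⟨none, 0, 0, 0, 0⟩, plus)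
      pvLoop p o size rest (r+1) (rows ++ [sp.1])
        (cols.zipIdx.map (fun cc => pvUpd p o cc.1 (row.getD cc.2 "")))
        (pvUpd p o dg (row.getD r ""))
        (pvUpd p o an (row.getD (size-1-r) ""))
        sp.2

def pacifistScoring_alt (board : List (List String)) (playerType : String) (opponentType : String) (depth : Int) : Int :=
  let size := board.length
  let st := pvLoop playerType opponentType size board 0 []
    (List.replicate size ⟨none, 0, 0, 0, 0⟩) ⟨none, 0, 0, 0, 0⟩ ⟨none, 0, 0, 0, 0⟩ 0
  let allStats := st.1 ++ st.2.1 ++ [st.2.2.1, st.2.2.2.1]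
  let winner0 := allStats.findSome? (fun s =>
    match s.first with
    | none => none
    | some f => if f ≠ "+" ∧ s.eqc = s.ln then some f else none)
  let winner : Option String :=
    match winner0 with
    | some w => some w
    | none => if st.2.2.2.2 = 0 then some "Tie" else none
  if winner = some playerType then -100
  else if winner = some opponentType then -500
  else if winner = some "Tie" then 300
  else -50 * ((allStats.filter (fun s => s.pc = 2 ∧ s.oc = 0)).length : Int)

-- ===== PRECONDITION & SPEC =====
-- Pre_ excludes the empty board and ragged boards with a row shorter than the board (there A's
-- lazy directional scans raise IndexError except when an early row win accidentally preempts the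
-- out-of-range access, while B's eager column-accumulator update raises IndexError on all of them).
def Pre_pacifistScoring (board : List (List String)) (playerType : String) (opponentType : String) (depth : Int) : Prop :=
  board ≠ [] ∧ ∀ row ∈ board, board.length ≤ row.length
instance (board : List (List String)) (playerType : String) (opponentType : String) (depth : Int) : Decidable (Pre_pacifistScoring board playerType opponentType depth) := by unfold Pre_pacifistScoring; infer_instance

def pvWitness_pacifistScoring : List (List String) × String × String × Int :=
  ([["x", "o"], ["+", "x"]], "x", "o", 0)

def Spec_pacifistScoring (board : List (List String)) (playerType : String) (opponentType : String) (depth : Int) (out : Int) : Prop := out = pacifistScoring_alt board playerType opponentType depth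
instance (board : List (List String)) (playerType : String) (opponentType : String) (depth : Int) (out : Int) : Decidable (Spec_pacifistScoring board playerType opponentType depth out) := by unfold Spec_pacifistScoring; infer_instance

-- ===== CLAIM (what is proved, stated in full; the proofs are below) =====
def Claim_equal_pacifistScoring : Prop := ∀ (board : List (List String)) (playerType : String) (opponentType : String) (depth : Int), Dom_pacifistScoring board playerType opponentType depth → Pre_pacifistScoring board playerType opponentType depth → Spec_pacifistScoring board playerType opponentType depth (pacifistScoring board playerType opponentType depth)

-- ===== LEMMAS AND PROOFS =====

def pvStatOf (p o : String) (l : List String) : PvStat := l.foldl (pvUpd p o) ⟨none, 0, 0, 0, 0⟩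

theorem pvUpd_foldl_some (p o f : String) (e a b n : Nat) (l : List String) :
    l.foldl (pvUpd p o) ⟨some f, e, a, b, n⟩ =
      ⟨some f, e + l.count f, a + l.count p, b + l.count o, n + l.length⟩ := by
  induction l generalizing e a b n with
  | nil => simp
  | cons h t ih =>
      simp only [List.foldl_cons, pvUpd, Option.getD_some]
      rw [ih]
      simp [List.count_cons, beq_iff_eq, PvStat.mk.injEq]
      split_ifs <;> omega

theorem pvStatOf_cons (p o h : String) (t : List String) :
    pvStatOf p o (h :: t) =
      ⟨some h, (h :: t).count h, (h :: t).count p, (h :: t).count o, (h :: t).length⟩ := by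
  simp only [pvStatOf, List.foldl_cons, pvUpd, Option.getD_none]
  rw [pvUpd_foldl_some]
  simp [List.count_cons, beq_iff_eq, PvStat.mk.injEq]
  split_ifs <;> omega

theorem pvStatOf_pc (p o : String) (l : List String) : (pvStatOf p o l).pc = l.count p := by
  cases l with
  | nil => rfl
  | cons h t => rw [pvStatOf_cons]

theorem pvStatOf_oc (p o : String) (l : List String) : (pvStatOf p o l).oc = l.count o := by
  cases l with
  | nil => rfl
  | cons h t => rw [pvStatOf_cons]

theorem pvInnerFold (p o : String) (row : List String) (k : Nat) :
    row.foldl (fun sp v => (pvUpd p o sp.1 v, sp.2 + (if v = "+" then 1 else 0)))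
      ((⟨none, 0, 0, 0, 0⟩ : PvStat), k) =
      (pvStatOf p o row, k + row.count "+") := by
  suffices H : ∀ (l : List String) (s : PvStat) (k : Nat),
      l.foldl (fun sp v => (pvUpd p o sp.1 v, sp.2 + (if v = "+" then 1 else 0))) (s, k) =
        (l.foldl (pvUpd p o) s, k + l.count "+") by
    simpa [pvStatOf] using H row ⟨none, 0, 0, 0, 0⟩ k
  intro l
  induction l with
  | nil => intro s k; simp
  | cons h t ih =>
      intro s k
      simp only [List.foldl_cons]
      rw [ih]
      simp [List.count_cons, beq_iff_eq, Prod.mk.injEq]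
      split_ifs <;> omega

theorem pvZipIdx_map_snd {α β : Type} (l : List α) (f : α × Nat → β) :
    (l.zipIdx.map f).zipIdx = l.zipIdx.map (fun ai => (f ai, ai.2)) := by
  apply List.ext_getElem
  · simp
  · intro i h1 h2
    simp [List.getElem_zipIdx]

theorem pvZipIdx_replicate {α : Type} (n : Nat) (a : α) :
    (List.replicate n a).zipIdx = (List.range n).map (fun i => (a, i)) := by
  apply List.ext_getElem
  · simp
  · intro i h1 h2
    simp [List.getElem_zipIdx]

theorem pvLoop_spec (p o : String) (size : Nat) (rest : List (List String)) :
    ∀ (r : Nat) (rows cols : List PvStat) (dg an : PvStat) (plus : Nat),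
    pvLoop p o size rest r rows cols dg an plus =
      (rows ++ rest.map (fun row => pvStatOf p o row),
       cols.zipIdx.map (fun cc => (rest.map (fun row => row.getD cc.2 "")).foldl (pvUpd p o) cc.1),
       ((rest.zipIdx r).map (fun ri => ri.1.getD ri.2 "")).foldl (pvUpd p o) dg,
       ((rest.zipIdx r).map (fun ri => ri.1.getD (size-1-ri.2) "")).foldl (pvUpd p o) an,
       plus + (rest.map (fun row => row.count "+")).sum) := by
  induction rest with
  | nil =>
      intro r rows cols dg an plus
      simp [pvLoop]
  | cons row rest ih =>
      intro r rows cols dg an plus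
      simp only [pvLoop, pvInnerFold]
      rw [ih]
      simp only [List.map_cons, List.zipIdx_cons, List.sum_cons, Prod.mk.injEq]
      refine ⟨by simp, ?_, by simp, by simp, by omega⟩
      rw [pvZipIdx_map_snd, List.map_map]
      rfl

theorem pvFindSome?_congr {α β : Type} (l : List α) (f g : α → Option β)
    (h : ∀ x ∈ l, f x = g x) : l.findSome? f = l.findSome? g := by
  induction l with
  | nil => rfl
  | cons x xs ih =>
      simp only [List.findSome?_cons, h x List.mem_cons_self,
        ih (fun y hy => h y (List.mem_cons_of_mem x hy))]

-- the winner test on a line's statistics ↔ A's direct check of the line, for a nonempty line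
theorem pvWins_statOf (p o : String) (l : List String) (hl : l ≠ []) :
    (match (pvStatOf p o l).first with
     | none => none
     | some f => if f ≠ "+" ∧ (pvStatOf p o l).eqc = (pvStatOf p o l).ln then some f else none) =
      (if l.getD 0 "" ≠ "+" ∧ l.all (fun cell => cell == l.getD 0 "")
       then some (l.getD 0 "") else none) := by
  cases l with
  | nil => exact absurd rfl hl
  | cons h t =>
      rw [pvStatOf_cons]
      simp only [List.getD_cons_zero]
      have key : ((h :: t).count h = (h :: t).length) ↔ ((h :: t).all (fun cell => cell == h) = true) := by
        rw [List.count_eq_length, List.all_eq_true]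
        constructor <;> intro H x hx
        · exact (beq_iff_eq ..).mpr (H x hx).symm
        · exact ((beq_iff_eq ..).mp (H x hx)).symm
      simp only [key]

theorem foldl_score_eq (P : List String → Prop) [DecidablePred P]
    (l : List (List String)) (a : Int) :
    l.foldl (fun score line => if P line then score - 50 else score) a =
      a - 50 * (l.countP (fun line => decide (P line)) : Int) := by
  induction l generalizing a with
  | nil => simp
  | cons x xs ih =>
      simp only [List.foldl_cons, List.countP_cons]
      by_cases h : P x
      · simp only [h, if_pos, decide_true, ih]; push_cast; ring
      · simp [h, ih]

theorem pvColCells (board : List (List String)) (c : Nat) :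
    board.map (fun row => row.getD c "") = (List.range board.length).map (fun r => pvCell board r c) := by
  apply List.ext_getElem
  · simp
  · intro i h1 h2
    simp only [List.length_map] at h1
    simp [pvCell, List.getD_eq_getElem?_getD, List.getElem?_eq_getElem h1]

theorem pvDiagCells (board : List (List String)) (f : Nat → Nat) :
    board.zipIdx.map (fun ri => ri.1.getD (f ri.2) "") =
      (List.range board.length).map (fun i => pvCell board i (f i)) := by
  apply List.ext_getElem
  · simp
  · intro i h1 h2
    simp only [List.length_map, List.length_zipIdx] at h1
    simp [pvCell, List.getElem_zipIdx, List.getD_eq_getElem?_getD, List.getElem?_eq_getElem h1]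

theorem pvStatOf_eq (p o : String) (l : List String) :
    l.foldl (pvUpd p o) ⟨none, 0, 0, 0, 0⟩ = pvStatOf p o l := rfl

theorem pvDiagCellsI (board : List (List String)) :
    board.zipIdx.map (fun ri => ri.1.getD ri.2 "") =
      (List.range board.length).map (fun i => pvCell board i i) :=
  pvDiagCells board (fun i => i)

theorem pvDiagCellsA (board : List (List String)) :
    board.zipIdx.map (fun ri => ri.1.getD (board.length - 1 - ri.2) "") =
      (List.range board.length).map (fun i => pvCell board i (board.length - 1 - i)) :=
  pvDiagCells board (fun i => board.length - 1 - i)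

-- B's accumulated statistics are exactly the statistics of A's line list
theorem pvStats_eq (p o : String) (board : List (List String)) :
    ([] ++ List.map (fun row => pvStatOf p o row) board ++
      List.map (fun cc => List.foldl (pvUpd p o) cc.1 (List.map (fun row => row.getD cc.2 "") board))
        (List.replicate board.length (⟨none, 0, 0, 0, 0⟩ : PvStat)).zipIdx ++
      [List.foldl (pvUpd p o) ⟨none, 0, 0, 0, 0⟩ (List.map (fun ri => ri.1.getD ri.2 "") board.zipIdx),
       List.foldl (pvUpd p o) ⟨none, 0, 0, 0, 0⟩ (List.map (fun ri => ri.1.getD (board.length - 1 - ri.2) "") board.zipIdx)]) =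
    (getLines board).map (pvStatOf p o) := by
  rw [pvDiagCellsI, pvDiagCellsA, pvZipIdx_replicate, List.map_map]
  simp only [List.nil_append, getLines, List.map_append, List.map_map, List.map_cons,
    List.map_nil, Function.comp_def, List.map_id']
  refine congrArg₂ _ (congrArg₂ _ rfl ?_) ?_
  · refine List.map_congr_left fun c _ => ?_
    rw [pvColCells, pvStatOf_eq]
  · rw [pvStatOf_eq, pvStatOf_eq]

theorem pvPlusZero (board : List (List String)) :
    ((board.map (fun row => row.count "+")).sum = 0) ↔
      (board.all (fun row => row.all (fun cell => cell ≠ "+")) = true) := by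
  rw [List.sum_eq_zero_iff]
  simp only [List.mem_map, forall_exists_index, and_imp, List.all_eq_true, decide_eq_true_eq]
  constructor
  · intro H row hr cell hc
    have := H (row.count "+") row hr rfl
    rw [List.count_eq_zero] at this
    intro he; exact this (he ▸ hc)
  · intro H x row hr hx
    subst hx
    rw [List.count_eq_zero]
    intro hmem
    exact H row hr "+" hmem rfl

theorem pvRowWinner_eq_findSome? (board : List (List String)) :
    pvRowWinner board =
      board.findSome? (fun line =>
        if line.getD 0 "" ≠ "+" ∧ line.all (fun cell => cell == line.getD 0 "")
        then some (line.getD 0 "") else none) := by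
  induction board with
  | nil => rfl
  | cons row rest ih =>
      simp only [pvRowWinner, List.findSome?_cons]
      split_ifs with h <;> simp [ih]

-- A's staged winner scan = a single findSome? of A's line check over A's line list
theorem winner_eq (board : List (List String)) :
    checkWinnerForScoring board =
      (match (getLines board).findSome? (fun line =>
           if line.getD 0 "" ≠ "+" ∧ line.all (fun cell => cell == line.getD 0 "")
           then some (line.getD 0 "") else none) with
       | some w => some w
       | none => if board.all (fun row => row.all (fun cell => cell ≠ "+")) then some "Tie" else none) := by
  by_cases hb : board = []
  · subst hb; rfl
  · have hn : 0 < board.length := List.length_pos_of_ne_nil hb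
    have hget : ∀ g : Nat → String, ((List.range board.length).map g).getD 0 "" = g 0 := by
      intro g; simp [List.getD_eq_getElem?_getD, List.getElem?_range hn]
    have hf : ∀ g : Nat → String,
        (if ((List.range board.length).map g).getD 0 "" ≠ "+" ∧
            ((List.range board.length).map g).all
              (fun cell => cell == ((List.range board.length).map g).getD 0 "")
         then some (((List.range board.length).map g).getD 0 "") else none)
        = (if g 0 ≠ "+" ∧ (List.range board.length).all (fun i => g i == g 0)
           then some (g 0) else none) := by
      intro g; simp only [hget, List.all_map, Function.comp_def]
    simp only [checkWinnerForScoring, getLines, List.findSome?_append, List.map_id',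
      List.findSome?_map, pvRowWinner_eq_findSome?, Function.comp_def, pvColWinner]
    cases hr : board.findSome? (fun line =>
        if line.getD 0 "" ≠ "+" ∧ line.all (fun cell => cell == line.getD 0 "")
        then some (line.getD 0 "") else none) with
    | some w => simp
    | none =>
      simp only []
      have hcol : (fun col => (fun line =>
            if line.getD 0 "" ≠ "+" ∧ line.all (fun cell => cell == line.getD 0 "")
            then some (line.getD 0 "") else none)
            ((List.range board.length).map (fun row => pvCell board row col)))
          = (fun col =>
            if pvCell board 0 col ≠ "+" ∧
               (List.range board.length).all (fun row => pvCell board row col == pvCell board 0 col)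
            then some (pvCell board 0 col) else none) := funext fun col => hf _
      rw [hcol]
      cases hc : (List.range board.length).findSome? (fun col =>
          if pvCell board 0 col ≠ "+" ∧
             (List.range board.length).all (fun row => pvCell board row col == pvCell board 0 col)
          then some (pvCell board 0 col) else none) with
      | some w => simp
      | none =>
        simp only [List.findSome?_cons, List.findSome?_nil]
        rw [hf (fun i => pvCell board i i), hf (fun i => pvCell board i (board.length - 1 - i))]
        simp only [Nat.sub_zero]
        split_ifs <;> rfl

-- every line A builds is nonempty (board nonempty, rows at least board-sized)
theorem pvLines_ne_nil (board : List (List String))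
    (hne : board ≠ []) (hlen : ∀ row ∈ board, board.length ≤ row.length) :
    ∀ l ∈ getLines board, l ≠ [] := by
  have hn : 0 < board.length := List.length_pos_of_ne_nil hne
  intro l hl
  simp only [getLines, List.mem_append, List.mem_map, List.mem_cons] at hl
  rcases hl with (⟨row, hr, rfl⟩ | ⟨c, _, rfl⟩) | (rfl | (rfl | h))
  · have h2 := hlen row hr
    intro h; subst h
    simp only [List.length_nil, Nat.le_zero] at h2
    omega
  · simp [List.map_eq_nil_iff, List.range_eq_nil]; omega
  · simp [List.map_eq_nil_iff, List.range_eq_nil]; omega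
  · simp [List.map_eq_nil_iff, List.range_eq_nil]; omega
  · exact absurd h (List.not_mem_nil)

-- ===== VERDICT (by name: the statement is the Claim_ definition above) =====
theorem pacifistScoring_spec : Claim_equal_pacifistScoring := by
  intro board p o d _ hpre
  obtain ⟨hne, hlen⟩ := hpre
  unfold Spec_pacifistScoring pacifistScoring pacifistScoring_alt
  rw [winner_eq]
  simp only [pvLoop_spec]
  rw [pvStats_eq, List.findSome?_map]
  simp only [Function.comp_def]
  have hfs := pvFindSome?_congr (getLines board)
      (fun l => match (pvStatOf p o l).first with
        | none => none
        | some f => if f ≠ "+" ∧ (pvStatOf p o l).eqc = (pvStatOf p o l).ln then some f else none)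
      (fun line => if line.getD 0 "" ≠ "+" ∧ line.all (fun cell => cell == line.getD 0 "")
        then some (line.getD 0 "") else none)
      (fun l hl => pvWins_statOf p o l (pvLines_ne_nil board hne hlen l hl))
  simp only [hfs]
  simp only [foldl_score_eq, Nat.zero_add, pvPlusZero, ← List.countP_eq_length_filter,
    List.countP_map, Function.comp_def, pvStatOf_pc, pvStatOf_oc, zero_sub, neg_mul]
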